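-- pv_equiv track=rewrite | github.com/joshanashakya/dissertation | workspace/dataset/java-python/GeeksForGeeks/1204/A/2.py | sum_sqsum
-- ===== SOURCE A (Python) =====
-- def sum_sqsum(n) :
--
--     sum = 0;
--     sqsum = 0;
--
--     # Until number is not
--     # zero
--     while (n) :
--         x = n % 10;
--         sum += x;
--         sqsum += x * x;
--         n //= 10;
--
--     return (sum, sqsum);
-- ===== SOURCE B (Python) =====
-- def sum_sqsum(n):
--     s = 0
--     sqsum = 0
--     for ch in str(n):
--         d = ord(ch) - 48
--         s += d
--         sqsum += d * d
--     return (s, sqsum)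
-- ===== Notes on version B (the rewrite author's own statement) =====
-- stated objective: idiomatic
-- what changed: B iterates most-significant-first over the characters of str(n), summing each digit and its square, instead of A's least-significant-first arithmetic extraction with % and //.
import Mathlib
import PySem

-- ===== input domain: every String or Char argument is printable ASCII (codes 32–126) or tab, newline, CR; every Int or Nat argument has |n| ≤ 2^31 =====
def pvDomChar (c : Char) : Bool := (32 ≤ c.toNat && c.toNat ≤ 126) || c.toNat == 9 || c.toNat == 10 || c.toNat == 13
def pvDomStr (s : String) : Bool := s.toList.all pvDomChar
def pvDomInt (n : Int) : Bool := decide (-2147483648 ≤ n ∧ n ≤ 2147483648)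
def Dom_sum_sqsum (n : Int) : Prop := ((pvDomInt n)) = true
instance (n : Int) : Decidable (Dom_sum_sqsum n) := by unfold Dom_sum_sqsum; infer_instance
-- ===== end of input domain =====

-- B sums digits from the decimal string of n (most-significant-first) instead of A's
-- arithmetic %/// extraction; equivalence is on n ≥ 0, where A terminates.

-- ===== PORT A =====
-- A's while-loop as fuel recursion; fuel n.natAbs + 1 strictly exceeds the iteration
-- count for every n ≥ 0 (the loop runs at most the digit count of n ≤ n), so the fuel
-- never runs out inside Pre_; Python's A never terminates for n < 0.
def pvLoopA : Nat → Int → Int → Int → Int × Int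
  | 0, _, s, sq => (s, sq)
  | f + 1, n, s, sq =>
    if n ≠ 0 then
      let x := PySem.Int.mod n 10
      pvLoopA f (PySem.Int.floordiv n 10) (s + x) (sq + x * x)
    else (s, sq)

def sum_sqsum (n : Int) : Int × Int := pvLoopA (n.natAbs + 1) n 0 0

-- ===== PORT B =====
def pvStep (acc : Int × Int) (c : Char) : Int × Int :=
  let d : Int := (c.toNat : Int) - 48
  (acc.1 + d, acc.2 + d * d)

def sum_sqsum_alt (n : Int) : Int × Int :=
  (PySem.Int.toStr n).toList.foldl pvStep (0, 0)

-- ===== PRECONDITION & SPEC =====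
-- Pre_ excludes n < 0, on which Python A never returns (n //= 10 stalls at -1: infinite loop).
def Pre_sum_sqsum (n : Int) : Prop := 0 ≤ n
instance (n : Int) : Decidable (Pre_sum_sqsum n) := by unfold Pre_sum_sqsum; infer_instance
def pvWitness_sum_sqsum : Int := 1234

def Spec_sum_sqsum (n : Int) (out : Int × Int) : Prop := out = sum_sqsum_alt n
instance (n : Int) (out : Int × Int) : Decidable (Spec_sum_sqsum n out) := by unfold Spec_sum_sqsum; infer_instance

-- ===== CLAIM (what is proved, stated in full; the proofs are below) =====
def Claim_equal_sum_sqsum : Prop := ∀ (n : Int), Dom_sum_sqsum n → Pre_sum_sqsum n → Spec_sum_sqsum n (sum_sqsum n)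

-- ===== LEMMAS AND PROOFS =====

-- core's toDigitsCore is fuel-independent once the fuel exceeds the number
lemma pv_toDigitsCore_eq (m : Nat) : ∀ (f : Nat) (l : List Char), m < f →
    Nat.toDigitsCore 10 f m l = Nat.toDigitsCore 10 (m + 1) m [] ++ l := by
  induction m using Nat.strong_induction_on with
  | _ m ih =>
    intro f l hf
    match f with
    | 0 => omega
    | f' + 1 =>
      by_cases h0 : m / 10 = 0
      · simp [Nat.toDigitsCore, h0]
      · have hm10 : 0 < m := Nat.pos_of_ne_zero (by rintro rfl; simp at h0)
        have hlt : m / 10 < m := Nat.div_lt_self hm10 (by norm_num)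
        rw [show Nat.toDigitsCore 10 (f' + 1) m l
              = Nat.toDigitsCore 10 f' (m / 10) (Nat.digitChar (m % 10) :: l) by
            simp [Nat.toDigitsCore, h0]]
        rw [show Nat.toDigitsCore 10 (m + 1) m []
              = Nat.toDigitsCore 10 m (m / 10) [Nat.digitChar (m % 10)] by
            simp [Nat.toDigitsCore, h0]]
        rw [ih (m / 10) hlt f' _ (by omega), ih (m / 10) hlt m _ (by omega)]
        simp

lemma pv_toDigits_step (m : Nat) (h : 10 ≤ m) :
    Nat.toDigits 10 m = Nat.toDigits 10 (m / 10) ++ [Nat.digitChar (m % 10)] := by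
  have h0 : m / 10 ≠ 0 := by
    intro h'; have := Nat.div_eq_zero_iff.mp h'; omega
  unfold Nat.toDigits
  rw [show Nat.toDigitsCore 10 (m + 1) m []
        = Nat.toDigitsCore 10 m (m / 10) [Nat.digitChar (m % 10)] by
      simp [Nat.toDigitsCore, h0]]
  exact pv_toDigitsCore_eq (m / 10) m _ (by
    have : m / 10 < m := Nat.div_lt_self (by omega) (by norm_num)
    omega)

lemma pv_toDigits_small (m : Nat) (h : m < 10) :
    Nat.toDigits 10 m = [Nat.digitChar m] := by
  have h0 : m / 10 = 0 := Nat.div_eq_of_lt h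
  unfold Nat.toDigits
  simp [Nat.toDigitsCore, h0, Nat.mod_eq_of_lt h]

lemma pv_digitChar_val : ∀ d : Nat, d < 10 → ((Nat.digitChar d).toNat : Int) - 48 = (d : Int) := by
  decide

-- the fold's accumulator is additively shiftable
lemma pv_fold_shift (cs : List Char) : ∀ (s sq a b : Int),
    cs.foldl pvStep (s + a, sq + b)
      = ((cs.foldl pvStep (s, sq)).1 + a, (cs.foldl pvStep (s, sq)).2 + b) := by
  induction cs with
  | nil => intro s sq a b; simp
  | cons c cs ih =>
    intro s sq a b
    simp only [List.foldl_cons, pvStep]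
    have h1 : s + a + ((c.toNat : Int) - 48) = s + ((c.toNat : Int) - 48) + a := by ring
    have h2 : sq + b + ((c.toNat : Int) - 48) * ((c.toNat : Int) - 48)
        = sq + ((c.toNat : Int) - 48) * ((c.toNat : Int) - 48) + b := by ring
    rw [h1, h2, ih]

-- main invariant: A's loop over (m : Int) computes B's fold over the decimal digits of m
lemma pv_main (m : Nat) : ∀ (f : Nat) (s sq : Int), m < f →
    pvLoopA f (m : Int) s sq = (Nat.toDigits 10 m).foldl pvStep (s, sq) := by
  induction m using Nat.strong_induction_on with
  | _ m ih =>
    intro f s sq hf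
    match f with
    | 0 => omega
    | f' + 1 =>
      by_cases hz : m = 0
      · subst hz
        simp [pvLoopA, pv_toDigits_small 0 (by norm_num), pvStep, Nat.digitChar]
      · have hmod : PySem.Int.mod (m : Int) 10 = ((m % 10 : Nat) : Int) := by
          exact_mod_cast PySem.Int.mod_natCast m 10
        have hdiv : PySem.Int.floordiv (m : Int) 10 = ((m / 10 : Nat) : Int) := by
          exact_mod_cast PySem.Int.floordiv_natCast m 10
        rw [show pvLoopA (f' + 1) (m : Int) s sq
              = pvLoopA f' (PySem.Int.floordiv (m : Int) 10)
                  (s + PySem.Int.mod (m : Int) 10)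
                  (sq + PySem.Int.mod (m : Int) 10 * PySem.Int.mod (m : Int) 10) by
            simp [pvLoopA, hz]]
        rw [hmod, hdiv]
        by_cases hsmall : m < 10
        · have h10 : m / 10 = 0 := Nat.div_eq_of_lt hsmall
          have hm : m % 10 = m := Nat.mod_eq_of_lt hsmall
          rw [h10, hm]
          have : pvLoopA f' ((0 : Nat) : Int) (s + (m : Int)) (sq + (m : Int) * (m : Int))
              = (s + (m : Int), sq + (m : Int) * (m : Int)) := by
            match f' with
            | 0 => rfl
            | g + 1 => simp [pvLoopA]
          rw [this, pv_toDigits_small m hsmall]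
          simp only [List.foldl_cons, List.foldl_nil, pvStep]
          rw [pv_digitChar_val m hsmall]
        · have hlt : m / 10 < m := Nat.div_lt_self (by omega) (by norm_num)
          rw [ih (m / 10) hlt f' _ _ (by omega)]
          rw [pv_toDigits_step m (by omega), List.foldl_append]
          simp only [List.foldl_cons, List.foldl_nil, pvStep]
          rw [pv_digitChar_val (m % 10) (Nat.mod_lt m (by norm_num))]
          have := pv_fold_shift (Nat.toDigits 10 (m / 10)) s sq ((m % 10 : Nat) : Int)
            (((m % 10 : Nat) : Int) * ((m % 10 : Nat) : Int))
          rw [this]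

-- ===== VERDICT (by name: the statement is the Claim_ definition above) =====
theorem sum_sqsum_spec : Claim_equal_sum_sqsum := by
  intro n _ hpre
  lift n to ℕ using hpre with m
  unfold Spec_sum_sqsum sum_sqsum sum_sqsum_alt
  rw [PySem.Int.toList_toStr]
  rw [show PySem.Int.toChars (m : Int) = Nat.toDigits 10 m by
    simp [PySem.Int.toChars]]
  rw [show (m : Int).natAbs = m from Int.natAbs_natCast m]
  exact pv_main m (m + 1) 0 0 (by omega)
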